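-- pv_equiv track=rewrite | github.com/tonyjo/multi_digit_classification_attention | gen_attn_truth.py | biggest_box
-- ===== SOURCE A (Python) =====
-- def biggest_box(samples, total_samples):
--     """
--     Compute the box encompassing all the digits.
--     """
--     all_left  = []
--     all_top   = []
--     all_width = []
--     all_heigt = []
--
--     for k in range(total_samples):
--         sample_label = samples[k][1]
--         sample_left  = samples[k][2]
--         sample_top   = samples[k][3]
--         sample_width = samples[k][4]
--         sample_heigt = samples[k][5]
--
--         all_left.append(sample_left)
--         all_top.append(sample_top)
--         all_width.append(sample_left+sample_width)
--         all_heigt.append(sample_top+sample_heigt)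
--
--     low_left = min(all_left)
--     low_top  = min(all_top)
--     highest_width = max(all_width) - low_left
--     highest_height = max(all_heigt) - low_top
--
--     return low_left, low_top, highest_width, highest_height
-- ===== SOURCE B (Python) =====
-- def _hull(rows):
--     """Divide-and-conquer union of digit boxes: (left, top, right, bottom)."""
--     if not rows:
--         raise ValueError("no samples")
--     if len(rows) == 1:
--         _, _, left, top, width, heigt = rows[0]
--         return left, top, left + width, top + heigt
--     mid = len(rows) // 2
--     l1, t1, r1, b1 = _hull(rows[:mid])
--     l2, t2, r2, b2 = _hull(rows[mid:])
--     return min(l1, l2), min(t1, t2), max(r1, r2), max(b1, b2)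
--
--
-- def biggest_box(samples, total_samples):
--     """
--     Compute the box encompassing all the digits by recursively merging
--     the bounding boxes of the two halves of the rows.
--     """
--     left, top, right, bottom = _hull(samples[:total_samples])
--     return left, top, right - left, bottom - top
-- ===== Notes on version B (the rewrite author's own statement) =====
-- stated objective: alternative
-- what changed: Replaces the index loop that appends to four lists and then reduces each with min/max by a divide-and-conquer recursion that splits the rows in half and merges the two halves' bounding boxes componentwise.
import Mathlib
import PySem

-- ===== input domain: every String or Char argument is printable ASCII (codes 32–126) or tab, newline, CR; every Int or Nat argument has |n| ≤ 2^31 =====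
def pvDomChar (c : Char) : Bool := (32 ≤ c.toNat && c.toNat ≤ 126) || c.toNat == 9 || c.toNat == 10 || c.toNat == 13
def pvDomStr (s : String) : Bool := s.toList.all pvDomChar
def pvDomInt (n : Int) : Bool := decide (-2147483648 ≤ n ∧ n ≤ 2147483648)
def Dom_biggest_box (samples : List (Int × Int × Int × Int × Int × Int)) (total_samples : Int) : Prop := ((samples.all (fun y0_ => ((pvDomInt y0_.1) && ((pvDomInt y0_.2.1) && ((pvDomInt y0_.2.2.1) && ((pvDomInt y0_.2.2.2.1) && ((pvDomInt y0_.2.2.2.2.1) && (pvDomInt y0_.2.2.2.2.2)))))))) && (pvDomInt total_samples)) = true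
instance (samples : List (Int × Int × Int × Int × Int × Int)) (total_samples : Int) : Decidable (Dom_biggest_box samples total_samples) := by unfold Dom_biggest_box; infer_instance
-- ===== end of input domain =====

-- B replaces A's index loop (append to four lists, then four min/max reductions)
-- by a divide-and-conquer recursion merging the bounding boxes of the two halves (objective: alternative).

-- ===== PORT A =====
def biggest_box (samples : List (Int × Int × Int × Int × Int × Int)) (total_samples : Int) : Int × Int × Int × Int :=
  -- for k in range(total_samples): read samples[k], append to the four lists
  let st := (PySem.List.pyRange 0 total_samples 1).foldl
    (fun (acc : List Int × List Int × List Int × List Int) k =>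
      let s := PySem.List.pyGetD samples k (0, 0, 0, 0, 0, 0)
      let sample_left  := s.2.2.1
      let sample_top   := s.2.2.2.1
      let sample_width := s.2.2.2.2.1
      let sample_heigt := s.2.2.2.2.2
      (acc.1 ++ [sample_left], acc.2.1 ++ [sample_top],
       acc.2.2.1 ++ [sample_left + sample_width], acc.2.2.2 ++ [sample_top + sample_heigt]))
    ([], [], [], [])
  let low_left := (PySem.List.min? st.1 (fun x => x)).getD 0          -- min([]) raises: excluded by Pre_
  let low_top  := (PySem.List.min? st.2.1 (fun x => x)).getD 0
  let highest_width  := (PySem.List.max? st.2.2.1 (fun x => x)).getD 0 - low_left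
  let highest_height := (PySem.List.max? st.2.2.2 (fun x => x)).getD 0 - low_top
  (low_left, low_top, highest_width, highest_height)

-- ===== PORT B =====
-- _hull: divide-and-conquer union of the digit boxes (left, top, right, bottom).
-- Python raises ValueError on []; that input is excluded by Pre_, here we return (0,0,0,0).
def pvHullB : List (Int × Int × Int × Int × Int × Int) → Int × Int × Int × Int
  | [] => (0, 0, 0, 0)
  | [r] => (r.2.2.1, r.2.2.2.1, r.2.2.1 + r.2.2.2.2.1, r.2.2.2.1 + r.2.2.2.2.2)
  | a :: b :: rest =>
    let rows := a :: b :: rest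
    let mid := rows.length / 2
    let h1 := pvHullB (rows.take mid)
    let h2 := pvHullB (rows.drop mid)
    (min h1.1 h2.1, min h1.2.1 h2.2.1, max h1.2.2.1 h2.2.2.1, max h1.2.2.2 h2.2.2.2)
termination_by rows => rows.length
decreasing_by
  · simp [List.length_take]; omega
  · simp; omega

def biggest_box_alt (samples : List (Int × Int × Int × Int × Int × Int)) (total_samples : Int) : Int × Int × Int × Int :=
  let h := pvHullB (PySem.List.slice samples none (some total_samples))
  (h.1, h.2.1, h.2.2.1 - h.1, h.2.2.2 - h.2.1)

-- ===== PRECONDITION & SPEC =====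
-- A raises unless 1 ≤ total_samples (min([]) is a ValueError) and total_samples ≤ len(samples) (IndexError).
def Pre_biggest_box (samples : List (Int × Int × Int × Int × Int × Int)) (total_samples : Int) : Prop :=
  1 ≤ total_samples ∧ total_samples ≤ (samples.length : Int)
instance (samples : List (Int × Int × Int × Int × Int × Int)) (total_samples : Int) : Decidable (Pre_biggest_box samples total_samples) := by unfold Pre_biggest_box; infer_instance
def pvWitness_biggest_box : (List (Int × Int × Int × Int × Int × Int)) × Int := ([(9, 9, 3, 4, 10, 20), (8, 8, 1, 6, 5, 7)], 2)

def Spec_biggest_box (samples : List (Int × Int × Int × Int × Int × Int)) (total_samples : Int) (out : Int × Int × Int × Int) : Prop := out = biggest_box_alt samples total_samples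
instance (samples : List (Int × Int × Int × Int × Int × Int)) (total_samples : Int) (out : Int × Int × Int × Int) : Decidable (Spec_biggest_box samples total_samples out) := by unfold Spec_biggest_box; infer_instance

-- ===== CLAIM (what is proved, stated in full; the proofs are below) =====
def Claim_equal_biggest_box : Prop := ∀ (samples : List (Int × Int × Int × Int × Int × Int)) (total_samples : Int), Dom_biggest_box samples total_samples → Pre_biggest_box samples total_samples → Spec_biggest_box samples total_samples (biggest_box samples total_samples)
-- ===== LEMMAS AND PROOFS =====

-- field accessors of a row
def pvL (r : Int × Int × Int × Int × Int × Int) : Int := r.2.2.1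
def pvT (r : Int × Int × Int × Int × Int × Int) : Int := r.2.2.2.1
def pvR (r : Int × Int × Int × Int × Int × Int) : Int := r.2.2.1 + r.2.2.2.2.1
def pvB (r : Int × Int × Int × Int × Int × Int) : Int := r.2.2.2.1 + r.2.2.2.2.2

-- the reduce-side value: foldl min / foldl max over the four field maps
def pvBoxOf (a : Int × Int × Int × Int × Int × Int) (rest : List (Int × Int × Int × Int × Int × Int)) : Int × Int × Int × Int :=
  ((rest.map pvL).foldl min (pvL a), (rest.map pvT).foldl min (pvT a),
   (rest.map pvR).foldl max (pvR a), (rest.map pvB).foldl max (pvB a))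

lemma foldl_min_assoc (l : List Int) (x y : Int) : l.foldl min (min x y) = min x (l.foldl min y) := by
  induction l generalizing y with
  | nil => rfl
  | cons c t ih => simp only [List.foldl_cons, min_assoc, ih]

lemma foldl_max_assoc (l : List Int) (x y : Int) : l.foldl max (max x y) = max x (l.foldl max y) := by
  induction l generalizing y with
  | nil => rfl
  | cons c t ih => simp only [List.foldl_cons, max_assoc, ih]

-- merging the reductions of two nonempty halves
lemma pvBoxOf_append (a : Int × Int × Int × Int × Int × Int) (as : List (Int × Int × Int × Int × Int × Int))
    (b : Int × Int × Int × Int × Int × Int) (bs : List (Int × Int × Int × Int × Int × Int)) :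
    pvBoxOf a (as ++ b :: bs) =
      (min (pvBoxOf a as).1 (pvBoxOf b bs).1,
       min (pvBoxOf a as).2.1 (pvBoxOf b bs).2.1,
       max (pvBoxOf a as).2.2.1 (pvBoxOf b bs).2.2.1,
       max (pvBoxOf a as).2.2.2 (pvBoxOf b bs).2.2.2) := by
  simp only [pvBoxOf, List.map_append, List.map_cons, List.foldl_append, List.foldl_cons,
    foldl_min_assoc, foldl_max_assoc]

-- the divide-and-conquer hull computes exactly those four reductions
lemma pvHullB_eq_boxOf : ∀ (n : Nat) (a : Int × Int × Int × Int × Int × Int)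
    (rest : List (Int × Int × Int × Int × Int × Int)), (a :: rest).length ≤ n →
    pvHullB (a :: rest) = pvBoxOf a rest := by
  intro n
  induction n using Nat.strong_induction_on with
  | _ n ih =>
    intro a rest hlen
    match rest with
    | [] => simp [pvHullB, pvBoxOf, pvL, pvT, pvR, pvB]
    | b :: t =>
      have hlen' : (a :: b :: t).length ≤ n := hlen
      rw [pvHullB]
      set rows := a :: b :: t with hrows
      set mid := rows.length / 2 with hmid
      have hb : 1 ≤ mid ∧ mid < rows.length := by
        constructor <;> · simp [hmid, hrows]; omega
      obtain ⟨k, hk⟩ : ∃ k, mid = k + 1 := ⟨mid - 1, by omega⟩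
      have htake : rows.take mid = a :: (b :: t).take k := by
        rw [hk, hrows]; simp [List.take_succ_cons]
      obtain ⟨a2, as2, hdrop⟩ : ∃ a2 as2, rows.drop mid = a2 :: as2 := by
        cases hdr : rows.drop mid with
        | nil =>
          exfalso
          have := congrArg List.length hdr
          simp [List.length_drop] at this
          omega
        | cons c s => exact ⟨c, s, rfl⟩
      have hdlen : (a2 :: as2).length = rows.length - mid := by
        have := congrArg List.length hdrop
        simpa [List.length_drop] using this.symm
      have e1 : pvHullB (rows.take mid) = pvBoxOf a ((b :: t).take k) := by
        rw [htake]
        apply ih mid (by omega) a ((b :: t).take k)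
        simp [List.length_take]; omega
      have e2 : pvHullB (rows.drop mid) = pvBoxOf a2 as2 := by
        rw [hdrop]
        apply ih (rows.length - mid) (by omega) a2 as2
        omega
      have hsplit : (b :: t).take k ++ a2 :: as2 = b :: t := by
        have h0 := List.take_append_drop mid rows
        rw [htake, hdrop] at h0
        have : a :: ((b :: t).take k ++ a2 :: as2) = a :: b :: t := by
          rw [hrows] at h0; simpa using h0
        injection this
      simp only [e1, e2]
      conv_rhs => rw [← hsplit]
      rw [pvBoxOf_append]

-- A's loop over range(n) builds exactly the four field-maps of the first n samples.
lemma biggest_box_loop (samples : List (Int × Int × Int × Int × Int × Int)) :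
    ∀ n : Nat, n ≤ samples.length →
    (PySem.List.pyRange 0 (n : Int) 1).foldl
      (fun (acc : List Int × List Int × List Int × List Int) k =>
        let s := PySem.List.pyGetD samples k (0, 0, 0, 0, 0, 0)
        let sample_left  := s.2.2.1
        let sample_top   := s.2.2.2.1
        let sample_width := s.2.2.2.2.1
        let sample_heigt := s.2.2.2.2.2
        (acc.1 ++ [sample_left], acc.2.1 ++ [sample_top],
         acc.2.2.1 ++ [sample_left + sample_width], acc.2.2.2 ++ [sample_top + sample_heigt]))
      ([], [], [], []) =
    ((samples.take n).map pvL, (samples.take n).map pvT,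
     (samples.take n).map pvR, (samples.take n).map pvB) := by
  intro n hn
  induction n with
  | zero => simp [PySem.List.pyRange_one_eq_nil]
  | succ m ih =>
    have hm : m ≤ samples.length := Nat.le_of_succ_le hn
    have hlt : m < samples.length := hn
    have hcast : ((m + 1 : Nat) : Int) = (m : Int) + 1 := by push_cast; ring
    rw [hcast, PySem.List.pyRange_one_succ_right (by positivity), List.foldl_append, ih hm]
    have hget : PySem.List.pyGetD samples (m : Int) ((0 : Int), (0 : Int), (0 : Int), (0 : Int), (0 : Int), (0 : Int)) = samples[m] :=
      PySem.List.pyGetD_ofNat samples m ((0 : Int), (0 : Int), (0 : Int), (0 : Int), (0 : Int), (0 : Int)) hlt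
    have htake : samples.take (m + 1) = samples.take m ++ [samples[m]] := by
      rw [List.take_add_one]; simp [List.getElem?_eq_getElem hlt]
    simp only [List.foldl_cons, List.foldl_nil, hget, htake, List.map_append, List.map_cons,
      List.map_nil, pvL, pvT, pvR, pvB]

-- ===== VERDICT (by name: the statement is the Claim_ definition above) =====
theorem biggest_box_spec : Claim_equal_biggest_box := by
  intro samples total_samples _hdom hpre
  obtain ⟨h1, h2⟩ := hpre
  unfold Spec_biggest_box biggest_box biggest_box_alt
  have hts : total_samples = ((total_samples.toNat : Nat) : Int) := (Int.toNat_of_nonneg (by omega)).symm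
  have hn : total_samples.toNat ≤ samples.length := by omega
  rw [hts, biggest_box_loop samples total_samples.toNat hn, PySem.List.slice_to_natCast]
  obtain ⟨a, rest, htk⟩ : ∃ a rest, samples.take total_samples.toNat = a :: rest := by
    cases htk : samples.take total_samples.toNat with
    | nil =>
      exfalso
      rw [List.take_eq_nil_iff] at htk
      rcases htk with h0 | hnil
      · omega
      · rw [hnil] at h2; simp at h2; omega
    | cons c t => exact ⟨c, t, rfl⟩
  rw [htk, pvHullB_eq_boxOf (a :: rest).length a rest le_rfl]
  simp [pvBoxOf, PySem.List.min?_id_cons, PySem.List.max?_id_cons]
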